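-- pv_equiv track=rewrite | github.com/m0hitgaur/Vicsek-model_V2 | visualize.py | get_recording_times
-- ===== SOURCE A (Python) =====
-- def get_recording_times(maxiter):
--     """Generate list of time steps that were recorded"""
--     times = []
--     for i in range(maxiter):
--         if(i<10):times.append(i)
--         if( 10<=i and i<100 and i % 10 == 0):times.append(i)
--         if(i<1000 and i>100 and i % 50 == 0):times.append(i)
--         if(i>1000 and i % 100 == 0):times.append(i)
--
--     return times
-- ===== SOURCE B (Python) =====
-- def get_recording_times(maxiter):
--     times = list(range(0, min(10, maxiter)))
--     times += range(10, min(100, maxiter), 10)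
--     times += range(150, min(1000, maxiter), 50)
--     times += range(1100, maxiter, 100)
--     return times
-- ===== Notes on version B (the rewrite author's own statement) =====
-- stated objective: faster
-- what changed: B emits the four arithmetic progressions directly as ranges clipped to maxiter instead of scanning every i in range(maxiter) and testing it against the piecewise modular rules.
import Mathlib
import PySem

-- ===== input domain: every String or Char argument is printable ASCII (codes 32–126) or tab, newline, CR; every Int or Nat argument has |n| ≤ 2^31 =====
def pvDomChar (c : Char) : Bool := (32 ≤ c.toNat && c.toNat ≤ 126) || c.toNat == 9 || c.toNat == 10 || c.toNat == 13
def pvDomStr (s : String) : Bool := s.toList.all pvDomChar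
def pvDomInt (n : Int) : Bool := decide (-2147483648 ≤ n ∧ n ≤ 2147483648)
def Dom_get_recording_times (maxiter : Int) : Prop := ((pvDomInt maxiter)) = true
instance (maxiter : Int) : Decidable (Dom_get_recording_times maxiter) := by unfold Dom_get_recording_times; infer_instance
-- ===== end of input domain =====

-- B replaces A's per-iteration scan with the four clipped arithmetic progressions emitted directly (faster: output-sized work instead of O(maxiter)).

-- ===== PORT A =====
-- loop body of A: the four sequential conditional appends
def pvStepA (times : List Int) (i : Int) : List Int :=
  let times := if i < 10 then times ++ [i] else times
  let times := if 10 ≤ i ∧ i < 100 ∧ PySem.Int.mod i 10 = 0 then times ++ [i] else times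
  let times := if i < 1000 ∧ 100 < i ∧ PySem.Int.mod i 50 = 0 then times ++ [i] else times
  let times := if 1000 < i ∧ PySem.Int.mod i 100 = 0 then times ++ [i] else times
  times

def get_recording_times (maxiter : Int) : List Int :=
  (PySem.List.pyRange 0 maxiter 1).foldl pvStepA []

-- ===== PORT B =====
def get_recording_times_alt (maxiter : Int) : List Int :=
  PySem.List.pyRange 0 (min 10 maxiter) 1 ++
  PySem.List.pyRange 10 (min 100 maxiter) 10 ++
  PySem.List.pyRange 150 (min 1000 maxiter) 50 ++
  PySem.List.pyRange 1100 maxiter 100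

-- ===== PRECONDITION & SPEC =====
def Spec_get_recording_times (maxiter : Int) (out : List Int) : Prop := out = get_recording_times_alt maxiter
instance (maxiter : Int) (out : List Int) : Decidable (Spec_get_recording_times maxiter out) := by unfold Spec_get_recording_times; infer_instance

-- ===== CLAIM (what is proved, stated in full; the proofs are below) =====
def Claim_equal_get_recording_times : Prop := ∀ (maxiter : Int), Dom_get_recording_times maxiter → Spec_get_recording_times maxiter (get_recording_times maxiter)

-- ===== LEMMAS AND PROOFS =====

-- the elements A's loop body appends for a given i
def pvDelta (i : Int) : List Int :=
  (if i < 10 then [i] else []) ++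
  (if 10 ≤ i ∧ i < 100 ∧ PySem.Int.mod i 10 = 0 then [i] else []) ++
  (if i < 1000 ∧ 100 < i ∧ PySem.Int.mod i 50 = 0 then [i] else []) ++
  (if 1000 < i ∧ PySem.Int.mod i 100 = 0 then [i] else [])

lemma pvStepA_eq (ts : List Int) (i : Int) : pvStepA ts i = ts ++ pvDelta i := by
  unfold pvStepA pvDelta
  split_ifs <;> simp

lemma pyRange_pos_eq_nil (a b s : Int) (hs : 0 < s) (h : b ≤ a) :
    PySem.List.pyRange a b s = [] := by
  rw [PySem.List.pyRange_of_pos _ _ hs]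
  simp [show ¬ a < b by omega]

lemma pyRange_pos_succ_right (a b s : Int) (hs : 0 < s) (hab : a ≤ b) :
    PySem.List.pyRange a (b + 1) s =
      PySem.List.pyRange a b s ++ (if s ∣ (b - a) then [b] else []) := by
  rw [PySem.List.pyRange_of_pos _ _ hs, PySem.List.pyRange_of_pos _ _ hs]
  rcases eq_or_lt_of_le hab with rfl | hlt
  · have h1 : a + 1 - a + s - 1 = s := by ring
    simp [Int.ediv_self (by omega : s ≠ 0), show a < a + 1 by omega]
  · set d := b - a with hd
    have hd1 : 1 ≤ d := by omega
    set q := d / s with hq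
    set r := d % s with hr
    have hqr : s * q + r = d := Int.mul_ediv_add_emod d s
    have hr0 : 0 ≤ r := Int.emod_nonneg d (by omega)
    have hrs : r < s := Int.emod_lt_of_pos d hs
    have hcount' : b + 1 - a + s - 1 = d + 1 * s := by omega
    have e1 : (d + 1 * s) / s = q + 1 := by
      rw [Int.add_mul_ediv_right _ _ (by omega : s ≠ 0)]
    have hcount : b - a + s - 1 = (d - 1) + 1 * s := by omega
    have e2 : ((d - 1) + 1 * s) / s = (d - 1) / s + 1 :=
      Int.add_mul_ediv_right _ _ (by omega : s ≠ 0)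
    by_cases hdvd : s ∣ d
    · have hq1 : 1 ≤ q := by
        rcases hdvd with ⟨c, hc⟩
        have : r = 0 := by
          have := Int.emod_emod_of_dvd d (dvd_refl s)
          rw [hr, hc, Int.mul_emod_right]
        nlinarith [this, hqr, hc]
      have hr00 : r = 0 := by
        rcases hdvd with ⟨c, hc⟩
        rw [hr, hc, Int.mul_emod_right]
      have e3 : (d - 1) / s = q - 1 := by
        have : d - 1 = (s - 1) + (q - 1) * s := by nlinarith [hqr, hr00]
        rw [this, Int.add_mul_ediv_right _ _ (by omega : s ≠ 0),
            Int.ediv_eq_zero_of_lt (by omega) (by omega)]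
        ring
      have hb : a + s * (q - 1 + 1) = b := by nlinarith [hqr, hr00]
      rw [hcount', hcount, e1, e2, e3, if_pos hdvd,
          if_pos (show a < b + 1 by omega), if_pos hlt]
      have hqn : (q + 1).toNat = (q - 1 + 1).toNat + 1 := by omega
      rw [hqn, List.range_succ, List.map_append]
      congr 1
      have hq' : (((q - 1 + 1).toNat : Int)) = q := by omega
      simp only [List.map_cons, List.map_nil, List.cons.injEq, and_true, hq']
      nlinarith [hqr, hr00]
    · have hr0' : r ≠ 0 := by
        intro h; exact hdvd ⟨q, by omega⟩
      have e3 : (d - 1) / s = q := by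
        have : d - 1 = (r - 1) + q * s := by rw [mul_comm q s]; omega
        rw [this, Int.add_mul_ediv_right _ _ (by omega : s ≠ 0),
            Int.ediv_eq_zero_of_lt (by omega) (by omega)]
        ring
      rw [hcount', hcount, e1, e2, e3, if_neg hdvd,
          if_pos (show a < b + 1 by omega), if_pos hlt]
      simp

lemma alt_nonpos (m : Int) (h : m ≤ 0) : get_recording_times_alt m = [] := by
  unfold get_recording_times_alt
  rw [pyRange_pos_eq_nil _ _ _ (by omega) (by omega),
      pyRange_pos_eq_nil _ _ _ (by omega) (by omega),
      pyRange_pos_eq_nil _ _ _ (by omega) (by omega),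
      pyRange_pos_eq_nil _ _ _ (by omega) (by omega)]
  rfl

lemma alt_succ (n : Int) (hn : 0 ≤ n) :
    get_recording_times_alt (n + 1) = get_recording_times_alt n ++ pvDelta n := by
  unfold get_recording_times_alt pvDelta
  have m10 : (10:Int) ∣ n ↔ PySem.Int.mod n 10 = 0 := (PySem.Int.mod_eq_zero_iff_dvd n 10).symm
  have m50 : (50:Int) ∣ n ↔ PySem.Int.mod n 50 = 0 := (PySem.Int.mod_eq_zero_iff_dvd n 50).symm
  have m100 : (100:Int) ∣ n ↔ PySem.Int.mod n 100 = 0 := (PySem.Int.mod_eq_zero_iff_dvd n 100).symm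
  rcases lt_or_ge n 10 with h1 | h1
  · rw [show min 10 (n+1) = n + 1 by omega, show min 10 n = n by omega,
        pyRange_pos_succ_right 0 n 1 (by omega) hn,
        pyRange_pos_eq_nil 10 (min 100 (n+1)) 10 (by omega) (by omega),
        pyRange_pos_eq_nil 10 (min 100 n) 10 (by omega) (by omega),
        pyRange_pos_eq_nil 150 (min 1000 (n+1)) 50 (by omega) (by omega),
        pyRange_pos_eq_nil 150 (min 1000 n) 50 (by omega) (by omega),
        pyRange_pos_eq_nil 1100 (n+1) 100 (by omega) (by omega),
        pyRange_pos_eq_nil 1100 n 100 (by omega) (by omega)]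
    simp [show n < 10 by omega, show ¬ (10 ≤ n) by omega, show ¬ (100 < n) by omega,
          show ¬ (1000 < n) by omega]
  rcases lt_or_ge n 100 with h2 | h2
  · rw [show min 10 (n+1) = 10 by omega, show min 10 n = 10 by omega,
        show min 100 (n+1) = n + 1 by omega, show min 100 n = n by omega,
        pyRange_pos_succ_right 10 n 10 (by omega) (by omega),
        pyRange_pos_eq_nil 150 (min 1000 (n+1)) 50 (by omega) (by omega),
        pyRange_pos_eq_nil 150 (min 1000 n) 50 (by omega) (by omega),
        pyRange_pos_eq_nil 1100 (n+1) 100 (by omega) (by omega),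
        pyRange_pos_eq_nil 1100 n 100 (by omega) (by omega)]
    by_cases hd : (10:Int) ∣ n
    · simp [show ¬ n < 10 by omega, show 10 ≤ n by omega, show n < 100 by omega,
            show ¬ (100 < n) by omega, show ¬ (1000 < n) by omega,
            show (10:Int) ∣ (n - 10) by omega]
      omega
    · simp [show ¬ n < 10 by omega, show ¬ (10:Int) ∣ (n - 10) by omega,
            show ¬ (100 < n) by omega, show ¬ (1000 < n) by omega]
      omega
  rcases lt_or_ge n 150 with h3 | h3
  · rw [show min 10 (n+1) = 10 by omega, show min 10 n = 10 by omega,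
        show min 100 (n+1) = 100 by omega, show min 100 n = 100 by omega,
        pyRange_pos_eq_nil 150 (min 1000 (n+1)) 50 (by omega) (by omega),
        pyRange_pos_eq_nil 150 (min 1000 n) 50 (by omega) (by omega),
        pyRange_pos_eq_nil 1100 (n+1) 100 (by omega) (by omega),
        pyRange_pos_eq_nil 1100 n 100 (by omega) (by omega)]
    simp [show ¬ n < 10 by omega, show ¬ n < 100 by omega,
          show ¬ (1000 < n) by omega]
    intro _ _ hm; omega
  rcases lt_or_ge n 1000 with h4 | h4
  · rw [show min 10 (n+1) = 10 by omega, show min 10 n = 10 by omega,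
        show min 100 (n+1) = 100 by omega, show min 100 n = 100 by omega,
        show min 1000 (n+1) = n + 1 by omega, show min 1000 n = n by omega,
        pyRange_pos_succ_right 150 n 50 (by omega) (by omega),
        pyRange_pos_eq_nil 1100 (n+1) 100 (by omega) (by omega),
        pyRange_pos_eq_nil 1100 n 100 (by omega) (by omega)]
    by_cases hd : (50:Int) ∣ n
    · simp [show ¬ n < 10 by omega, show ¬ n < 100 by omega, show n < 1000 by omega,
            show 100 < n by omega, show ¬ (1000 < n) by omega,
            show (50:Int) ∣ (n - 150) by omega]
      omega
    · simp [show ¬ n < 10 by omega, show ¬ n < 100 by omega,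
            show ¬ (50:Int) ∣ (n - 150) by omega,
            show ¬ (1000 < n) by omega]
      omega
  rcases lt_or_ge n 1100 with h5 | h5
  · rw [show min 10 (n+1) = 10 by omega, show min 10 n = 10 by omega,
        show min 100 (n+1) = 100 by omega, show min 100 n = 100 by omega,
        show min 1000 (n+1) = 1000 by omega, show min 1000 n = 1000 by omega,
        pyRange_pos_eq_nil 1100 (n+1) 100 (by omega) (by omega),
        pyRange_pos_eq_nil 1100 n 100 (by omega) (by omega)]
    simp [show ¬ n < 10 by omega, show ¬ n < 100 by omega, show ¬ n < 1000 by omega]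
    intro _ hm; omega
  · rw [show min 10 (n+1) = 10 by omega, show min 10 n = 10 by omega,
        show min 100 (n+1) = 100 by omega, show min 100 n = 100 by omega,
        show min 1000 (n+1) = 1000 by omega, show min 1000 n = 1000 by omega,
        pyRange_pos_succ_right 1100 n 100 (by omega) (by omega)]
    by_cases hd : (100:Int) ∣ n
    · simp [show ¬ n < 10 by omega, show ¬ n < 100 by omega, show ¬ n < 1000 by omega,
            show 1000 < n by omega, show (100:Int) ∣ (n - 1100) by omega]
      omega
    · simp [show ¬ n < 10 by omega, show ¬ n < 100 by omega, show ¬ n < 1000 by omega,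
            show ¬ (100:Int) ∣ (n - 1100) by omega]
      omega

lemma main_eq (n : Nat) : get_recording_times (n : Int) = get_recording_times_alt (n : Int) := by
  induction n with
  | zero =>
      rw [show ((0:Nat):Int) = 0 by simp]
      rw [get_recording_times, PySem.List.pyRange_one_eq_nil (by omega), alt_nonpos 0 (by omega)]
      rfl
  | succ k ih =>
      have hk : (0:Int) ≤ (k:Int) := by positivity
      rw [show ((k+1:Nat):Int) = (k:Int) + 1 by push_cast; ring]
      rw [get_recording_times, PySem.List.pyRange_one_succ_right hk, List.foldl_append,
          List.foldl_cons, List.foldl_nil, pvStepA_eq]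
      rw [show ((PySem.List.pyRange 0 (k:Int) 1).foldl pvStepA []) = get_recording_times (k:Int) from rfl,
          ih, alt_succ (k:Int) hk]

-- ===== VERDICT (by name: the statement is the Claim_ definition above) =====
theorem get_recording_times_spec : Claim_equal_get_recording_times := by
  intro m _
  unfold Spec_get_recording_times
  rcases le_or_gt m 0 with hm | hm
  · rw [get_recording_times, PySem.List.pyRange_one_eq_nil (by omega), alt_nonpos m hm]
    rfl
  · have := main_eq m.toNat
    rwa [Int.toNat_of_nonneg (le_of_lt hm)] at this
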